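-- pv_equiv track=rewrite | github.com/z0nk3r/aoc | 2015/03/day03.py | part2
-- ===== SOURCE A (Python) =====
-- def part2(lines):
--     '''Function to solve part 2'''
--     answer = 0
--     dirs = {'^': (-1, 0), '>': (0, 1), 'v': (1, 0), '<': (0, -1)}
--     s_loc = (0, 0)
--     r_loc = (0, 0)
--     visited = set()
--     visited.add(s_loc)
--
--     for dir_ in lines[0][0::2]:
--         new_dr, new_dc = dirs[dir_]
--         new_r = s_loc[0] + new_dr
--         new_c = s_loc[1] + new_dc
--         visited.add((new_r, new_c))
--         s_loc = (new_r, new_c)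
--
--     for dir_ in lines[0][1::2]:
--         new_dr, new_dc = dirs[dir_]
--         new_r = r_loc[0] + new_dr
--         new_c = r_loc[1] + new_dc
--         visited.add((new_r, new_c))
--         r_loc = (new_r, new_c)
--
--     answer = len(visited)
--     return answer
-- ===== SOURCE B (Python) =====
-- def part2(lines):
--     '''Function to solve part 2'''
--     cur = (0, 0)
--     other = (0, 0)
--     seen = {cur}
--     for ch in lines[0]:
--         cur = (cur[0] + (ch == 'v') - (ch == '^'),
--                cur[1] + (ch == '>') - (ch == '<'))
--         seen.add(cur)
--         cur, other = other, cur
--     return len(seen)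
-- ===== Notes on version B (the rewrite author's own statement) =====
-- stated objective: alternative
-- what changed: B makes a single pass over the whole string with a (current, other) actor pair swapped each step and computes each move arithmetically from character comparisons, instead of A's two separate strided-slice loops each driven by a direction dictionary.
import Mathlib
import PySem

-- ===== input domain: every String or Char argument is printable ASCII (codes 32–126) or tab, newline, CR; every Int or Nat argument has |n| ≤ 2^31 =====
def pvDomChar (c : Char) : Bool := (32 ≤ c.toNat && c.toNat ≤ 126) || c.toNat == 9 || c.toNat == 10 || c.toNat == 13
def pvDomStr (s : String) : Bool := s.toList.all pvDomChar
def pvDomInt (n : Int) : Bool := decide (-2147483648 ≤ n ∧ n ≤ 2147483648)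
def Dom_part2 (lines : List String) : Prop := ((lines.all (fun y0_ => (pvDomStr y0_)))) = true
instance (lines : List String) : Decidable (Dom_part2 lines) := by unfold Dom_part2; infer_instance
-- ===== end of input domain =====

-- B replaces A's two strided-slice loops over a direction dictionary by ONE pass over the whole
-- string with a swapped (current, other) actor pair and arithmetic move deltas (objective: alternative).

-- ===== PORT A =====
def dirsA : PySem.Dict Char (Int × Int) :=
  (((PySem.Dict.empty.insert '^' (-1, 0)).insert '>' (0, 1)).insert 'v' (1, 0)).insert '<' (0, -1)

def part2 (lines : List String) : Int :=
  let line := ((PySem.List.pyGet? lines 0).getD "").toList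
  let visited0 : PySem.Set (Int × Int) := PySem.Set.add PySem.Set.empty (0, 0)
  let step := fun (st : (Int × Int) × PySem.Set (Int × Int)) (ch : Char) =>
    let d := (dirsA.get? ch).getD (0, 0)
    let p := (st.1.1 + d.1, st.1.2 + d.2)
    (p, PySem.Set.add st.2 p)
  let r1 := ((PySem.Chars.slice? line (some 0) none 2).getD []).foldl step ((0, 0), visited0)
  let r2 := ((PySem.Chars.slice? line (some 1) none 2).getD []).foldl step ((0, 0), r1.2)
  PySem.Set.len r2.2

-- ===== PORT B =====
def part2_alt (lines : List String) : Int :=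
  let line := ((PySem.List.pyGet? lines 0).getD "").toList
  let r := line.foldl
    (fun (st : ((Int × Int) × (Int × Int)) × PySem.Set (Int × Int)) (ch : Char) =>
      let cur := st.1.1
      let other := st.1.2
      let p := (cur.1 + ((if ch == 'v' then (1 : Int) else 0) - (if ch == '^' then (1 : Int) else 0)),
                cur.2 + ((if ch == '>' then (1 : Int) else 0) - (if ch == '<' then (1 : Int) else 0)))
      ((other, p), PySem.Set.add st.2 p))
    (((0, 0), (0, 0)), PySem.Set.add PySem.Set.empty (0, 0))
  PySem.Set.len r.2

-- ===== PRECONDITION & SPEC =====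
-- Pre_ excludes exactly the inputs where Python A raises: an empty lines list (IndexError on
-- lines[0]) and a first line containing a character other than '^' '>' 'v' '<' (KeyError in dirs).
def Pre_part2 (lines : List String) : Prop :=
  lines ≠ [] ∧ ((lines.headD "").toList.all (fun c => c == '^' || c == '>' || c == 'v' || c == '<')) = true
instance (lines : List String) : Decidable (Pre_part2 lines) := by unfold Pre_part2; infer_instance

def pvWitness_part2 : List String := ["^>v<^^"]

def Spec_part2 (lines : List String) (out : Int) : Prop := out = part2_alt lines
instance (lines : List String) (out : Int) : Decidable (Spec_part2 lines out) := by unfold Spec_part2; infer_instance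

-- ===== CLAIM (what is proved, stated in full; the proofs are below) =====
def Claim_equal_part2 : Prop := ∀ (lines : List String), Dom_part2 lines → Pre_part2 lines → Spec_part2 lines (part2 lines)

-- ===== LEMMAS AND PROOFS =====

-- the per-character move, shared characterisation of both ports' deltas
def delta (ch : Char) : Int × Int :=
  ((if ch == 'v' then (1 : Int) else 0) - (if ch == '^' then (1 : Int) else 0),
   (if ch == '>' then (1 : Int) else 0) - (if ch == '<' then (1 : Int) else 0))

lemma dirsA_delta (ch : Char) : (dirsA.get? ch).getD (0, 0) = delta ch := by
  by_cases h1 : ch = '<' <;> by_cases h2 : ch = 'v' <;> by_cases h3 : ch = '>' <;>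
    by_cases h4 : ch = '^' <;>
  simp_all [dirsA, delta, PySem.Dict.get?_insert, PySem.Dict.get?_empty]

-- elements at even / odd indices
def evens {α : Type} : List α → List α
  | [] => []
  | [a] => [a]
  | a :: _ :: r => a :: evens r

def odds {α : Type} : List α → List α
  | [] => []
  | [_] => []
  | _ :: b :: r => b :: odds r

lemma evens_odds_cons {α : Type} (r : List α) :
    (∀ a : α, evens (a :: r) = a :: odds r) ∧ (∀ a : α, odds (a :: r) = evens r) := by
  induction r with
  | nil => exact ⟨fun _ => rfl, fun _ => rfl⟩
  | cons h t ih =>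
      refine ⟨fun a => ?_, fun a => ?_⟩
      · show a :: evens t = a :: odds (h :: t)
        rw [ih.2 h]
      · show h :: odds t = evens (h :: t)
        rw [ih.1 h]

lemma evens_cons {α : Type} (a : α) (r : List α) : evens (a :: r) = a :: odds r :=
  (evens_odds_cons r).1 a

lemma odds_cons {α : Type} (a : α) (r : List α) : odds (a :: r) = evens r :=
  (evens_odds_cons r).2 a

lemma slice_cons0 (a : Char) (r : List Char) :
    (PySem.Chars.slice? (a :: r) (some 0) none 2).getD []
      = a :: (PySem.Chars.slice? r (some 1) none 2).getD [] := by
  cases r with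
  | nil =>
    simp [PySem.Chars.slice?, PySem.List.slice?, PySem.List.sliceIndices]
  | cons b t =>
    simp only [PySem.Chars.slice?, PySem.List.slice?, PySem.List.sliceIndices]
    norm_num
    have hc1 : (((t.length : Int) + 1 + 1 - min 0 ((t.length : Int) + 1 + 1) + 2 - 1) / 2).toNat
        = (t.length + 1) / 2 + 1 := by omega
    have hc2 : (if 0 < t.length then (((t.length : Int) + 2 - 1) / 2).toNat else 0)
        = (t.length + 1) / 2 := by split_ifs <;> omega
    have hpos : (0 : Int) ≤ (t.length : Int) + 1 := by positivity
    rw [if_pos hpos, hc1, hc2, List.range_succ_eq_map]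
    have h0 : ((a :: b :: t)[(min 0 ((t.length : Int) + 1 + 1) + 2 * ((0 : Nat) : Int)).toNat]?)
        = some a := by
      have h : (min 0 ((t.length : Int) + 1 + 1) + 2 * ((0 : Nat) : Int)).toNat = 0 := by omega
      rw [h]; rfl
    simp only [List.filterMap_cons, h0, List.filterMap_map]
    congr 1
    apply List.filterMap_congr
    intro x hx
    have h1 : (min 0 ((t.length : Int) + 1 + 1) + 2 * ((Nat.succ x : Nat) : Int)).toNat
        = (2 * x + 1) + 1 := by omega
    have h2 : ((1 : Int) + 2 * (x : Int)).toNat = 2 * x + 1 := by omega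
    simp only [Function.comp, h1, h2, List.getElem?_cons_succ]

lemma slice_cons1 (a : Char) (r : List Char) :
    (PySem.Chars.slice? (a :: r) (some 1) none 2).getD []
      = (PySem.Chars.slice? r (some 0) none 2).getD [] := by
  cases r with
  | nil =>
    simp [PySem.Chars.slice?, PySem.List.slice?, PySem.List.sliceIndices]
  | cons b t =>
    simp only [PySem.Chars.slice?, PySem.List.slice?, PySem.List.sliceIndices]
    norm_num
    have hc : (((t.length : Int) + 1 + 1 - min 1 ((t.length : Int) + 1 + 1) + 2 - 1) / 2).toNat
        = (((t.length : Int) + 1 - min 0 ((t.length : Int) + 1) + 2 - 1) / 2).toNat := by omega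
    rw [hc]
    apply List.filterMap_congr
    intro x hx
    have h1 : (min 1 ((t.length : Int) + 1 + 1) + 2 * (x : Int)).toNat = (2 * x) + 1 := by omega
    have h2 : (min 0 ((t.length : Int) + 1) + 2 * (x : Int)).toNat = 2 * x := by omega
    simp only [h1, h2, List.getElem?_cons_succ]

lemma slice_evens_odds (l : List Char) :
    (PySem.Chars.slice? l (some 0) none 2).getD [] = evens l ∧
    (PySem.Chars.slice? l (some 1) none 2).getD [] = odds l := by
  induction l with
  | nil => constructor <;> rfl
  | cons a r ih =>
      refine ⟨?_, ?_⟩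
      · rw [slice_cons0, evens_cons, ih.2]
      · rw [slice_cons1, odds_cons, ih.1]

-- the position sequence visited from `loc` following `moves` (start excluded)
def posA (loc : Int × Int) : List Char → List (Int × Int)
  | [] => []
  | ch :: rest =>
      let p := (loc.1 + (delta ch).1, loc.2 + (delta ch).2)
      p :: posA p rest

-- the position sequence of B's interleaved walk: cur moves first, then the actors swap
def interPos (cur other : Int × Int) : List Char → List (Int × Int)
  | [] => []
  | ch :: rest =>
      let p := (cur.1 + (delta ch).1, cur.2 + (delta ch).2)
      p :: interPos other p rest

lemma foldl_stepA (moves : List Char) (loc : Int × Int) (v : PySem.Set (Int × Int)) :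
    (moves.foldl
      (fun (st : (Int × Int) × PySem.Set (Int × Int)) (ch : Char) =>
        let d := (dirsA.get? ch).getD (0, 0)
        let p := (st.1.1 + d.1, st.1.2 + d.2)
        (p, PySem.Set.add st.2 p)) (loc, v)).2
    = PySem.Set.update v (posA loc moves) := by
  induction moves generalizing loc v with
  | nil => simp [posA, PySem.Set.update]
  | cons ch rest ih =>
      simp only [List.foldl_cons]
      rw [ih]
      simp only [dirsA_delta, posA]
      rw [PySem.Set.update_cons]

lemma foldl_stepB (moves : List Char) (cur other : Int × Int) (v : PySem.Set (Int × Int)) :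
    (moves.foldl
      (fun (st : ((Int × Int) × (Int × Int)) × PySem.Set (Int × Int)) (ch : Char) =>
        let c := st.1.1
        let o := st.1.2
        let p := (c.1 + ((if ch == 'v' then (1 : Int) else 0) - (if ch == '^' then (1 : Int) else 0)),
                  c.2 + ((if ch == '>' then (1 : Int) else 0) - (if ch == '<' then (1 : Int) else 0)))
        ((o, p), PySem.Set.add st.2 p)) ((cur, other), v)).2
    = PySem.Set.update v (interPos cur other moves) := by
  induction moves generalizing cur other v with
  | nil => simp [interPos, PySem.Set.update]
  | cons ch rest ih =>
      simp only [List.foldl_cons, interPos]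
      rw [ih, PySem.Set.update_cons]
      rfl

lemma mem_interPos (moves : List Char) (cur other : Int × Int) (x : Int × Int) :
    x ∈ interPos cur other moves ↔ x ∈ posA cur (evens moves) ∨ x ∈ posA other (odds moves) := by
  induction moves generalizing cur other with
  | nil => simp [interPos, evens, odds, posA]
  | cons ch rest ih =>
      rw [evens_cons, odds_cons]
      simp only [interPos, posA, List.mem_cons, ih]
      tauto

lemma len_update_eq (v : PySem.Set (Int × Int)) (hv : v.Nodup)
    (xs ys : List (Int × Int)) (h : ∀ x, x ∈ xs ↔ x ∈ ys) :
    PySem.Set.len (PySem.Set.update v xs) = PySem.Set.len (PySem.Set.update v ys) := by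
  have h1 : (PySem.Set.update v xs).Nodup := PySem.Set.nodup_update v xs hv
  have h2 : (PySem.Set.update v ys).Nodup := PySem.Set.nodup_update v ys hv
  have hmem : ∀ x, x ∈ PySem.Set.update v xs ↔ x ∈ PySem.Set.update v ys := by
    intro x
    rw [PySem.Set.mem_update, PySem.Set.mem_update, h x]
  have hperm : (PySem.Set.update v xs).Perm (PySem.Set.update v ys) :=
    (List.perm_ext_iff_of_nodup h1 h2).mpr hmem
  simp [PySem.Set.len, hperm.length_eq]

-- ===== VERDICT (by name: the statements are the Claim_ definitions above) =====
theorem part2_spec : Claim_equal_part2 := by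
  intro lines _ _
  unfold Spec_part2 part2 part2_alt
  simp only [foldl_stepA, foldl_stepB, (slice_evens_odds _).1, (slice_evens_odds _).2]
  rw [← PySem.Set.update_append]
  refine len_update_eq _ ?_ _ _ ?_
  · decide
  · intro x
    rw [List.mem_append, mem_interPos]
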